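-- pv_equiv track=rewrite | github.com/navjo2323/butterfly-matrix-completion | butterfly_completion.py | gen_einstr
-- ===== SOURCE A (Python) =====
-- def gen_einstr(length):
-- 	A_str = ""
-- 	B_str = ""
-- 	einstr = ""
-- 	for i in range(length):
-- 		if i != length-1:
-- 			A_str += chr(ord('a')+i) + chr(ord('a')+i+1) + ','
-- 			B_str += chr(ord('a')+length+i) + chr(ord('a')+length+i+1) + ','
-- 		else:
-- 			A_str += chr(ord('a')+i) + 'z,'
-- 			B_str += chr(ord('a')+length+i) + 'z'
-- 	#einstr += A_str + "yz,"+ B_str +"->" + "a"+chr(ord('a')+length)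
-- 	einstr += A_str + B_str +"->" + "a"+chr(ord('a')+length)
-- 	return einstr
-- ===== SOURCE B (Python) =====
-- def gen_einstr(length):
--     a_nodes = [chr(ord('a') + i) for i in range(length)] + ['z']
--     b_nodes = [chr(ord('a') + length + i) for i in range(length)] + ['z']
--     A_str = ''.join(x + y + ',' for x, y in zip(a_nodes, a_nodes[1:]))
--     B_str = ','.join(x + y for x, y in zip(b_nodes, b_nodes[1:]))
--     return A_str + B_str + '->a' + chr(ord('a') + length)
-- ===== Notes on version B (the rewrite author's own statement) =====
-- stated objective: simpler
-- what changed: B builds the node-label sequences first and pairs adjacent nodes (zip with ''.join / ','.join), eliminating A's per-iteration last-index branch and the two hand-grown accumulator strings.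
import Mathlib
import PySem

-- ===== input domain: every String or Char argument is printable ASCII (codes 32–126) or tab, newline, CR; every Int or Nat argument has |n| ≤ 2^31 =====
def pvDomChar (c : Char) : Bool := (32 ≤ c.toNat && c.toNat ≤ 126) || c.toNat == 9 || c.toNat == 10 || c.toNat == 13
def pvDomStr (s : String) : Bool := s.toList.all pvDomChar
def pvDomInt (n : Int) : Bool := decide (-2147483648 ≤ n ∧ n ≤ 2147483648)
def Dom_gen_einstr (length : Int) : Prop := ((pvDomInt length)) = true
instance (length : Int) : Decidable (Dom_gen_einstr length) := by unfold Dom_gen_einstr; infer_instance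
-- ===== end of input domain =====

-- B builds node-label lists and pairs adjacent nodes with joins instead of A's
-- per-iteration last-index branch with two growing accumulators; same result, simpler.

-- chr(n) for a valid non-surrogate code point (guaranteed by Pre_)
def pyChr (n : Int) : Char := Char.ofNat n.toNat

-- ===== PORT A =====
def gen_einstr (length : Int) : String :=
  let p := (PySem.List.pyRange 0 length 1).foldl
    (fun (s : List Char × List Char) i =>
      if i ≠ length - 1 then
        (s.1 ++ [pyChr (97 + i), pyChr (97 + i + 1), ','],
         s.2 ++ [pyChr (97 + length + i), pyChr (97 + length + i + 1), ','])
      else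
        (s.1 ++ [pyChr (97 + i), 'z', ','],
         s.2 ++ [pyChr (97 + length + i), 'z'])) ([], [])
  String.ofList (p.1 ++ p.2 ++ ['-', '>'] ++ ['a'] ++ [pyChr (97 + length)])

-- ===== PORT B =====
def gen_einstr_alt (length : Int) : String :=
  let a_nodes : List Char := (PySem.List.pyRange 0 length 1).map (fun i => pyChr (97 + i)) ++ ['z']
  let b_nodes : List Char := (PySem.List.pyRange 0 length 1).map (fun i => pyChr (97 + length + i)) ++ ['z']
  let A_str : List Char := PySem.Chars.join [] ((a_nodes.zip a_nodes.tail).map (fun p => [p.1, p.2, ',']))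
  let B_str : List Char := PySem.Chars.join [','] ((b_nodes.zip b_nodes.tail).map (fun p => [p.1, p.2]))
  String.ofList (A_str ++ B_str ++ ['-', '>', 'a'] ++ [pyChr (97 + length)])

-- ===== PRECONDITION & SPEC =====
-- Pre_ excludes length < -97 and length > 557007, where Python's chr raises ValueError, and
-- also 27600 ≤ length ≤ 557007, where A returns a string containing UTF-16 surrogate code
-- points, which are not values of Lean's Char/String type (both Pythons agree there).
def Pre_gen_einstr (length : Int) : Prop := -97 ≤ length ∧ length ≤ 27599
instance (length : Int) : Decidable (Pre_gen_einstr length) := by unfold Pre_gen_einstr; infer_instance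
def pvWitness_gen_einstr : Int := 3
def Spec_gen_einstr (length : Int) (out : String) : Prop := out = gen_einstr_alt length
instance (length : Int) (out : String) : Decidable (Spec_gen_einstr length out) := by unfold Spec_gen_einstr; infer_instance

-- ===== CLAIM (what is proved, stated in full; the proofs are below) =====
def Claim_equal_gen_einstr : Prop := ∀ (length : Int), Dom_gen_einstr length → Pre_gen_einstr length → Spec_gen_einstr length (gen_einstr length)

-- ===== LEMMAS AND PROOFS =====

-- A's A_str accumulation, seen as a flatMap over the range, equals B's paired-node ''.join.
theorem flat_pairs (f : Int → Char) (a b : Int) (hab : a < b) :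
    (PySem.List.pyRange a b 1).flatMap
      (fun i => if i ≠ b - 1 then [f i, f (i + 1), ','] else [f i, 'z', ','])
    = PySem.Chars.join []
        (((((PySem.List.pyRange a b 1).map f ++ ['z']).zip
            ((PySem.List.pyRange a b 1).map f ++ ['z']).tail)).map
          (fun p => [p.1, p.2, ','])) := by
  induction hn : (b - a).toNat generalizing a with
  | zero => omega
  | succ n ih =>
    by_cases hlast : a = b - 1
    · subst hlast
      have hone : PySem.List.pyRange (b - 1) b 1 = [b - 1] := by
        have h := PySem.List.pyRange_one_singleton (b - 1)
        rwa [show b - 1 + 1 = b by ring] at h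
      simp [hone, PySem.Chars.join_singleton]
    · have h1 : a + 1 < b := by omega
      have ht := ih (a + 1) h1 (by omega)
      rw [PySem.List.pyRange_one_cons h1] at ht
      rw [PySem.List.pyRange_one_cons hab, PySem.List.pyRange_one_cons h1]
      simp only [List.flatMap_cons, List.map_cons, List.cons_append, List.zip_cons_cons,
        List.tail_cons, if_pos hlast] at ht ⊢
      rcases e : List.map f (PySem.List.pyRange (a + 1 + 1) b 1) with _ | ⟨x, xs⟩
      · have hnil : PySem.List.pyRange (a + 1 + 1) b 1 = [] := List.map_eq_nil_iff.mp e
        have h2 : a + 1 = b - 1 := by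
          by_contra hc
          rw [PySem.List.pyRange_one_cons (by omega)] at hnil
          simp at hnil
        rw [e] at ht
        simp only [List.nil_append, List.zip_cons_cons, List.zip_nil_right, List.map_cons,
          List.map_nil, hnil, List.flatMap_nil, List.append_nil,
          if_neg (by omega : ¬ (a + 1 ≠ b - 1))] at ht ⊢
        rw [PySem.Chars.join_cons_cons, ← ht]
        simp
      · rw [e] at ht
        simp only [List.cons_append, List.zip_cons_cons, List.map_cons] at ht ⊢
        rw [PySem.Chars.join_cons_cons, ← ht]
        simp

-- A's B_str accumulation, as a flatMap over the range, equals B's paired-node ','.join.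
theorem join_pairs (f : Int → Char) (a b : Int) (hab : a < b) :
    (PySem.List.pyRange a b 1).flatMap
      (fun i => if i ≠ b - 1 then [f i, f (i + 1), ','] else [f i, 'z'])
    = PySem.Chars.join [',']
        (((((PySem.List.pyRange a b 1).map f ++ ['z']).zip
            ((PySem.List.pyRange a b 1).map f ++ ['z']).tail)).map
          (fun p => [p.1, p.2])) := by
  induction hn : (b - a).toNat generalizing a with
  | zero => omega
  | succ n ih =>
    by_cases hlast : a = b - 1
    · subst hlast
      have hone : PySem.List.pyRange (b - 1) b 1 = [b - 1] := by
        have h := PySem.List.pyRange_one_singleton (b - 1)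
        rwa [show b - 1 + 1 = b by ring] at h
      simp [hone, PySem.Chars.join_singleton]
    · have h1 : a + 1 < b := by omega
      have ht := ih (a + 1) h1 (by omega)
      rw [PySem.List.pyRange_one_cons h1] at ht
      rw [PySem.List.pyRange_one_cons hab, PySem.List.pyRange_one_cons h1]
      simp only [List.flatMap_cons, List.map_cons, List.cons_append, List.zip_cons_cons,
        List.tail_cons, if_pos hlast] at ht ⊢
      rcases e : List.map f (PySem.List.pyRange (a + 1 + 1) b 1) with _ | ⟨x, xs⟩
      · have hnil : PySem.List.pyRange (a + 1 + 1) b 1 = [] := List.map_eq_nil_iff.mp e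
        have h2 : a + 1 = b - 1 := by
          by_contra hc
          rw [PySem.List.pyRange_one_cons (by omega)] at hnil
          simp at hnil
        rw [e] at ht
        simp only [List.nil_append, List.zip_cons_cons, List.zip_nil_right, List.map_cons,
          List.map_nil, hnil, List.flatMap_nil, List.append_nil,
          if_neg (by omega : ¬ (a + 1 ≠ b - 1))] at ht ⊢
        rw [PySem.Chars.join_cons_cons, ← ht]
        simp
      · rw [e] at ht
        simp only [List.cons_append, List.zip_cons_cons, List.map_cons] at ht ⊢
        rw [PySem.Chars.join_cons_cons, ← ht]
        simp

-- ===== VERDICT (by name: the statement is the Claim_ definition above) =====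
theorem gen_einstr_spec : Claim_equal_gen_einstr := by
  intro length _ _
  unfold Spec_gen_einstr gen_einstr gen_einstr_alt
  by_cases hpos : 0 < length
  · have hstep :
        (fun (s : List Char × List Char) (i : Int) =>
          if i ≠ length - 1 then
            (s.1 ++ [pyChr (97 + i), pyChr (97 + i + 1), ','],
             s.2 ++ [pyChr (97 + length + i), pyChr (97 + length + i + 1), ','])
          else
            (s.1 ++ [pyChr (97 + i), 'z', ','],
             s.2 ++ [pyChr (97 + length + i), 'z']))
      = (fun (s : List Char × List Char) (i : Int) =>
          (s.1 ++ (if i ≠ length - 1 then [pyChr (97 + i), pyChr (97 + i + 1), ','] else [pyChr (97 + i), 'z', ',']),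
           s.2 ++ (if i ≠ length - 1 then [pyChr (97 + length + i), pyChr (97 + length + i + 1), ','] else [pyChr (97 + length + i), 'z']))) := by
      funext s i; split <;> rfl
    simp only [hstep,
      PySem.List.foldl_prod_mk
        (f := fun (acc : List Char) (i : Int) => acc ++ (if i ≠ length - 1 then [pyChr (97 + i), pyChr (97 + i + 1), ','] else [pyChr (97 + i), 'z', ','] : List Char))
        (g := fun (acc : List Char) (i : Int) => acc ++ (if i ≠ length - 1 then [pyChr (97 + length + i), pyChr (97 + length + i + 1), ','] else [pyChr (97 + length + i), 'z'] : List Char)),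
      PySem.List.foldl_append_eq_flatMap, List.nil_append]
    have e1 := flat_pairs (fun i => pyChr (97 + i)) 0 length hpos
    have e2 := join_pairs (fun i => pyChr (97 + length + i)) 0 length hpos
    simp only [add_assoc] at e1 e2 ⊢
    rw [e1, e2]
    simp
  · have h0 : PySem.List.pyRange 0 length 1 = [] :=
      PySem.List.pyRange_one_eq_nil (by omega)
    simp [h0, PySem.Chars.join_nil]
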